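-- pv_equiv track=rewrite | github.com/remekozicki/ASD | 2Programaowanie_dynamiczne/asystent_profesora.py | asystent
-- ===== SOURCE A (Python) =====
-- def asystent(T):
--     n = len(T)
--     F = [[0 for i in range(n)]for i in range(n)]
--     pre_sum = [0]*n
--     pre_sum[0] = T[0]
--     for i in range(1,n):
--         pre_sum[i] = pre_sum[i-1]+T[i]
--
--     for i in range(n-1):
--         F[i][i+1] = abs(T[i]+T[i+1])
--
--     for l in range(2,n):
--         for i in range(n-l+1):
--             j = i+l
--             if j >= n:
--                 break
--             else:
--                 w = min(F[i][j-1],F[i+1][j])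
--                 F[i][j] = max( abs(pre_sum[n-1]) , w)
--
--     return F[0][n-1]
-- ===== SOURCE B (Python) =====
-- def asystent(T):
--     if len(T) == 1:
--         return 0
--     total = abs(sum(T))
--     m = min(abs(T[i] + T[i + 1]) for i in range(len(T) - 1))
--     return max(total, m)
-- ===== Notes on version B (the rewrite author's own statement) =====
-- stated objective: faster
-- what changed: Replaced the O(n^2) interval DP table (F[i][j] = max(|total|, min of subintervals)) by its closed form: the answer is max(|sum(T)|, min_i |T[i]+T[i+1]|) computed in one linear pass (0 for a single-element list, as A returns).
import Mathlib
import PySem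

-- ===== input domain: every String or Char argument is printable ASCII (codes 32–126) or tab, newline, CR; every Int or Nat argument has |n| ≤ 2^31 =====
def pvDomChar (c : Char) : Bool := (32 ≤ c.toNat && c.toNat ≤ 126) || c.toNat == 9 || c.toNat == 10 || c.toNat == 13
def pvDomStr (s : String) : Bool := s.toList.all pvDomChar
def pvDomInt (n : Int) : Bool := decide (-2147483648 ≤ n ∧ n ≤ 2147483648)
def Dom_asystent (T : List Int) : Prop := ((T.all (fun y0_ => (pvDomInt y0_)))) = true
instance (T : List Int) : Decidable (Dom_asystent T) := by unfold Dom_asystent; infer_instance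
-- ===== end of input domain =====

-- B replaces A's O(n^2) interval-DP table by the closed form
-- max(|sum T|, min_i |T[i]+T[i+1]|), one linear pass (asymptotically faster).

-- ===== PORT A =====
-- helpers for A's list-of-lists table F: read / write at (i, j)
def pvGet2 (F : List (List Int)) (i j : Nat) : Int := (F.getD i []).getD j 0
def pvSet2 (F : List (List Int)) (i j : Nat) (v : Int) : List (List Int) :=
  F.set i ((F.getD i []).set j v)

-- body of A's inner loop (total = abs(pre_sum[n-1]))
def pvInner (T : List Int) (total : Int) (l : Nat) (F : List (List Int)) (i : Nat) : List (List Int) :=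
  let j := i + l
  if T.length ≤ j then F  -- Python's 'break': only the last index i = n-l reaches it, so skipping it is the same
  else
    let w := min (pvGet2 F i (j - 1)) (pvGet2 F (i + 1) j)
    pvSet2 F i j (max total w)

def asystent (T : List Int) : Int :=
  let n := T.length
  let F : List (List Int) := (List.range n).map (fun _ => (List.range n).map (fun _ => (0 : Int)))
  let pre0 : List Int := (List.replicate n (0 : Int)).set 0 (T.getD 0 0)  -- pre_sum[0] = T[0]; in range under Pre_
  let pre : List Int :=
    (List.range' 1 (n - 1)).foldl (fun p i => p.set i (p.getD (i - 1) 0 + T.getD i 0)) pre0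
  let F1 : List (List Int) :=
    (List.range (n - 1)).foldl (fun F i => pvSet2 F i (i + 1) |T.getD i 0 + T.getD (i + 1) 0|) F
  let F2 : List (List Int) :=
    (List.range' 2 (n - 2)).foldl (fun F l => (List.range (n - l + 1)).foldl (pvInner T |pre.getD (n - 1) 0| l) F) F1
  pvGet2 F2 0 (n - 1)

-- ===== PORT B =====
def asystent_alt (T : List Int) : Int :=
  if T.length = 1 then 0
  else
    let total := |T.sum|
    let xs := (List.range (T.length - 1)).map (fun i => |T.getD i 0 + T.getD (i + 1) 0|)
    match xs with
    | [] => 0  -- only for T = [], where the Python B raises ValueError (outside Pre_)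
    | h :: t => max total (t.foldl min h)

-- ===== PRECONDITION & SPEC =====
-- Pre_ excludes only the empty list, on which A raises IndexError (T[0]).
def Pre_asystent (T : List Int) : Prop := T ≠ []
instance (T : List Int) : Decidable (Pre_asystent T) := by unfold Pre_asystent; infer_instance
def pvWitness_asystent : List Int := ([1, -2, 3] : List Int)

def Spec_asystent (T : List Int) (out : Int) : Prop := out = asystent_alt T
instance (T : List Int) (out : Int) : Decidable (Spec_asystent T out) := by unfold Spec_asystent; infer_instance

-- ===== CLAIM (what is proved, stated in full; the proofs are below) =====
def Claim_equal_asystent : Prop := ∀ (T : List Int), Dom_asystent T → Pre_asystent T → Spec_asystent T (asystent T)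

-- ===== LEMMAS AND PROOFS =====

-- |T[i] + T[i+1]|, the adjacent-pair value
def pairAbs (T : List Int) (i : Nat) : Int := |T.getD i 0 + T.getD (i + 1) 0|

-- min of pairAbs over k ∈ [i, i+c]
def mp (T : List Int) (i : Nat) : Nat → Int
  | 0 => pairAbs T i
  | c + 1 => min (pairAbs T i) (mp T (i + 1) c)

theorem mp_snoc (T : List Int) (c : Nat) : ∀ i, mp T i (c + 1) = min (mp T i c) (pairAbs T (i + c + 1)) := by
  induction c with
  | zero => intro i; simp [mp]
  | succ c ih =>
      intro i
      show min (pairAbs T i) (mp T (i + 1) (c + 1)) = _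
      rw [ih (i + 1), mp, min_assoc]
      ring_nf

theorem mp_overlap (T : List Int) (c : Nat) : ∀ i, min (mp T i c) (mp T (i + 1) c) = mp T i (c + 1) := by
  induction c with
  | zero => intro i; simp [mp]
  | succ c ih =>
      intro i
      show min (min (pairAbs T i) (mp T (i + 1) c)) (min (pairAbs T (i + 1)) (mp T (i + 1 + 1) c)) = _
      rw [min_min_min_comm, ih (i + 1)]
      show _ = min (pairAbs T i) (mp T (i + 1) (c + 1))
      rw [min_assoc]
      congr 1
      show min (pairAbs T (i + 1)) (min (pairAbs T (i + 1)) (mp T (i + 1 + 1) c)) = _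
      rw [← min_assoc, min_self]
      rfl

-- generic getD/set lemmas
theorem getD_set_self {α : Type} (l : List α) (i : Nat) (v d : α) (h : i < l.length) :
    (l.set i v).getD i d = v := by
  simp [List.getD_eq_getElem?_getD, h]

theorem getD_set_ne {α : Type} (l : List α) {i i' : Nat} (v d : α) (h : i ≠ i') :
    (l.set i v).getD i' d = l.getD i' d := by
  simp [List.getD_eq_getElem?_getD, List.getElem?_set_ne h]

theorem length_pvSet2 (F : List (List Int)) (i j : Nat) (v : Int) :
    (pvSet2 F i j v).length = F.length := by
  simp [pvSet2]

theorem rowlen_pvSet2 (F : List (List Int)) (i j : Nat) (v : Int) (i' : Nat) :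
    ((pvSet2 F i j v).getD i' []).length = (F.getD i' []).length := by
  by_cases hi : i < F.length
  · by_cases h : i = i'
    · subst h; rw [pvSet2, getD_set_self _ _ _ _ hi]; simp
    · rw [pvSet2, getD_set_ne _ _ _ h]
  · rw [pvSet2, List.set_eq_of_length_le (by omega)]

theorem pvGet2_set2_self (F : List (List Int)) (i j : Nat) (v : Int)
    (h1 : i < F.length) (h2 : j < (F.getD i []).length) :
    pvGet2 (pvSet2 F i j v) i j = v := by
  rw [pvGet2, pvSet2, getD_set_self _ _ _ _ h1, getD_set_self _ _ _ _ h2]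

theorem pvGet2_set2_ne (F : List (List Int)) (i j : Nat) (v : Int) (i' j' : Nat)
    (h : i ≠ i' ∨ j ≠ j') :
    pvGet2 (pvSet2 F i j v) i' j' = pvGet2 F i' j' := by
  rcases h with h | h
  · rw [pvGet2, pvSet2, getD_set_ne _ _ _ h]; rfl
  · by_cases hi : i < F.length
    · by_cases he : i = i'
      · subst he
        rw [pvGet2, pvSet2, getD_set_self _ _ _ _ hi, getD_set_ne _ _ _ h]; rfl
      · rw [pvGet2, pvSet2, getD_set_ne _ _ _ he]; rfl
    · rw [pvSet2, List.set_eq_of_length_le (by omega)]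

-- the invariant of A's DP table: row/column sizes, the base diagonal, the diagonals
-- up to l-1 complete, and diagonal l written for i < m
def TblInv (T : List Int) (tt : Int) (l m : Nat) (F : List (List Int)) : Prop :=
  F.length = T.length ∧
  (∀ i', i' < T.length → (F.getD i' []).length = T.length) ∧
  (∀ i, i + 1 < T.length → pvGet2 F i (i + 1) = pairAbs T i) ∧
  (∀ i j, j < T.length → i + 2 ≤ j → (j ≤ i + (l - 1) ∨ (j = i + l ∧ i < m)) →
      pvGet2 F i j = max tt (mp T i (j - i - 1)))

theorem inner_step (T : List Int) (tt : Int) (l m : Nat) (F : List (List Int))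
    (hl : 2 ≤ l) (h : TblInv T tt l m F) :
    TblInv T tt l (m + 1) (pvInner T tt l F m) := by
  obtain ⟨h1, h2, hb, h4⟩ := h
  unfold pvInner
  by_cases hc : T.length ≤ m + l
  · rw [if_pos hc]
    refine ⟨h1, h2, hb, ?_⟩
    intro i j hj hij hbnd
    refine h4 i j hj hij ?_
    rcases hbnd with hbnd | ⟨hbe, hbi⟩
    · exact Or.inl hbnd
    · rcases Nat.lt_or_ge i m with him | him
      · exact Or.inr ⟨hbe, him⟩
      · omega
  · rw [if_neg hc]
    show TblInv T tt l (m + 1)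
      (pvSet2 F m (m + l) (max tt (min (pvGet2 F m (m + l - 1)) (pvGet2 F (m + 1) (m + l)))))
    have hmn : m + l < T.length := by omega
    have hmF : m < F.length := by omega
    have hrow : (F.getD m []).length = T.length := h2 m (by omega)
    refine ⟨by rw [length_pvSet2]; exact h1, ?_, ?_, ?_⟩
    · intro i' hi'; rw [rowlen_pvSet2]; exact h2 i' hi'
    · intro i hi
      have hne : m ≠ i ∨ m + l ≠ i + 1 := by omega
      rw [pvGet2_set2_ne _ _ _ _ _ _ hne]; exact hb i hi
    · intro i j hj hij hbnd
      by_cases hcase : i = m ∧ j = m + l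
      · obtain ⟨hi, hja⟩ := hcase
        subst hi; subst hja
        rw [pvGet2_set2_self _ _ _ _ hmF (by omega)]
        rcases Nat.lt_or_ge l 3 with hl2 | hl3
        · -- l = 2: both reads are base-diagonal entries
          have hle : l = 2 := by omega
          subst hle
          rw [show i + 2 - 1 = i + 1 from by omega, hb i (by omega), hb (i + 1) (by omega),
            show i + 2 - i - 1 = 1 from by omega]
          simp [mp]
        · -- l ≥ 3: both reads are completed diagonal-(l-1) entries
          rw [h4 i (i + l - 1) (by omega) (by omega) (Or.inl (by omega)),
            h4 (i + 1) (i + l) (by omega) (by omega) (Or.inl (by omega)),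
            show i + l - 1 - i - 1 = l - 2 from by omega,
            show i + l - (i + 1) - 1 = l - 2 from by omega,
            ← max_min_distrib_left, ← max_assoc, max_self,
            mp_overlap T (l - 2) i,
            show l - 2 + 1 = l - 1 from by omega,
            show i + l - i - 1 = l - 1 from by omega]
      · have hne : m ≠ i ∨ m + l ≠ j := by
          rcases Decidable.em (i = m) with h' | h'
          · rcases Decidable.em (j = m + l) with h'' | h''
            · exact absurd ⟨h', h''⟩ hcase
            · exact Or.inr (fun he => h'' he.symm)
          · exact Or.inl (fun he => h' he.symm)
        rw [pvGet2_set2_ne _ _ _ _ _ _ hne]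
        refine h4 i j hj hij ?_
        rcases hbnd with hbnd | ⟨hbe, hbi⟩
        · exact Or.inl hbnd
        · have him : i ≠ m := by
            intro hie; subst hie
            exact hcase ⟨rfl, by omega⟩
          exact Or.inr ⟨hbe, by omega⟩

theorem inner_fold (T : List Int) (tt : Int) (l : Nat) (F0 : List (List Int))
    (hl : 2 ≤ l) (h0 : TblInv T tt l 0 F0) (m : Nat) :
    TblInv T tt l m ((List.range m).foldl (pvInner T tt l) F0) := by
  induction m with
  | zero => simpa using h0
  | succ m ih =>
      rw [List.range_succ, List.foldl_append]
      exact inner_step T tt l m _ hl ih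

theorem TblInv_shift (T : List Int) (tt : Int) (l : Nat) (F : List (List Int))
    (hl : 2 ≤ l) (h : TblInv T tt l (T.length - l + 1) F) :
    TblInv T tt (l + 1) 0 F := by
  obtain ⟨h1, h2, h3, h4⟩ := h
  refine ⟨h1, h2, h3, ?_⟩
  intro i j hj hij hb
  rcases hb with hb | hb
  · rcases Nat.lt_or_ge (j - i) l with hd | hd
    · exact h4 i j hj hij (Or.inl (by omega))
    · exact h4 i j hj hij (Or.inr (by omega))
  · omega

theorem outer_fold (T : List Int) (tt : Int) (k : Nat) (F0 : List (List Int))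
    (h0 : TblInv T tt 2 0 F0) :
    TblInv T tt (k + 2) 0
      ((List.range' 2 k).foldl
        (fun F l => (List.range (T.length - l + 1)).foldl (pvInner T tt l) F) F0) := by
  induction k with
  | zero => simpa using h0
  | succ k ih =>
      rw [List.range'_concat, List.foldl_append]
      have h1 := inner_fold T tt (2 + k) _ (by omega)
        (by rw [show 2 + k = k + 2 by omega]; exact ih) (T.length - (2 + k) + 1)
      have h2 := TblInv_shift T tt (2 + k) _ (by omega) h1
      rw [show 2 + k + 1 = k + 1 + 2 by omega] at h2
      simpa using h2

-- prefix sums: A's pre_sum loop really computes T.sum at index n-1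
theorem take_sum_succ (T : List Int) (k : Nat) (h : k < T.length) :
    (T.take (k + 1)).sum = (T.take k).sum + T.getD k 0 := by
  rw [List.sum_take_succ _ _ h, List.getD_eq_getElem _ _ h]

theorem pre_fold (T : List Int) (hT : T ≠ []) (m : Nat) (hm : m ≤ T.length - 1) :
    ((List.range' 1 m).foldl (fun p i => p.set i (p.getD (i - 1) 0 + T.getD i 0))
        ((List.replicate T.length (0 : Int)).set 0 (T.getD 0 0))).length = T.length ∧
    ∀ k, k ≤ m → ((List.range' 1 m).foldl (fun p i => p.set i (p.getD (i - 1) 0 + T.getD i 0))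
        ((List.replicate T.length (0 : Int)).set 0 (T.getD 0 0))).getD k 0 = (T.take (k + 1)).sum := by
  have h0 : 0 < T.length := List.length_pos_iff.mpr hT
  induction m with
  | zero =>
      refine ⟨by simp, ?_⟩
      intro k hk
      interval_cases k
      rw [List.range'_zero, List.foldl_nil, getD_set_self _ _ _ _ (by simpa using h0),
        take_sum_succ T 0 h0]
      simp
  | succ m ih =>
      obtain ⟨ih1, ih2⟩ := ih (by omega)
      rw [List.range'_concat, List.foldl_append, List.foldl_cons, List.foldl_nil]
      simp only [Nat.one_mul]
      refine ⟨by rw [List.length_set]; exact ih1, ?_⟩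
      intro k hk
      rcases Nat.lt_or_ge k (m + 1) with hk' | hk'
      · rw [getD_set_ne _ _ _ (show 1 + m ≠ k from by omega), ih2 k (by omega)]
      · have hke : k = 1 + m := by omega
        subst hke
        rw [getD_set_self _ _ _ _ (by rw [ih1]; omega), show 1 + m - 1 = m from by omega,
          ih2 m le_rfl, show 1 + m = m + 1 from by omega, take_sum_succ T (m + 1) (by omega)]

theorem pre_sum_eq (T : List Int) (hT : T ≠ []) :
    ((List.range' 1 (T.length - 1)).foldl (fun p i => p.set i (p.getD (i - 1) 0 + T.getD i 0))
        ((List.replicate T.length (0 : Int)).set 0 (T.getD 0 0))).getD (T.length - 1) 0 = T.sum := by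
  obtain ⟨hlen, hval⟩ := pre_fold T hT (T.length - 1) le_rfl
  have hn : 0 < T.length := List.length_pos_iff.mpr hT
  have := hval (T.length - 1) le_rfl
  rw [this, show T.length - 1 + 1 = T.length by omega, List.take_length]

-- the all-zero initial table
theorem getD_map_range {α : Type} (n : Nat) (f : Nat → α) (i : Nat) (d : α) (h : i < n) :
    (((List.range n).map f).getD i d) = f i := by
  rw [List.getD_eq_getElem?_getD]
  simp [h]

-- the base-diagonal loop establishes TblInv _ _ 2 0
theorem base_fold (T : List Int) (m : Nat) (hm : m ≤ T.length - 1) :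
    ((List.range m).foldl
        (fun F i => pvSet2 F i (i + 1) |T.getD i 0 + T.getD (i + 1) 0|)
        ((List.range T.length).map (fun _ => (List.range T.length).map (fun _ => (0 : Int))))).length = T.length ∧
    (∀ i', i' < T.length →
      (((List.range m).foldl
        (fun F i => pvSet2 F i (i + 1) |T.getD i 0 + T.getD (i + 1) 0|)
        ((List.range T.length).map (fun _ => (List.range T.length).map (fun _ => (0 : Int))))).getD i' []).length = T.length) ∧
    ∀ i, i < m → pvGet2 ((List.range m).foldl
        (fun F i => pvSet2 F i (i + 1) |T.getD i 0 + T.getD (i + 1) 0|)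
        ((List.range T.length).map (fun _ => (List.range T.length).map (fun _ => (0 : Int))))) i (i + 1) = pairAbs T i := by
  induction m with
  | zero =>
      refine ⟨by simp, ?_, by omega⟩
      intro i' hi'
      rw [List.range_zero, List.foldl_nil, getD_map_range _ _ _ _ hi']
      simp
  | succ m ih =>
      obtain ⟨ih1, ih2, ih3⟩ := ih (by omega)
      rw [List.range_succ, List.foldl_append, List.foldl_cons, List.foldl_nil]
      refine ⟨by rw [length_pvSet2]; exact ih1, ?_, ?_⟩
      · intro i' hi'
        rw [rowlen_pvSet2]; exact ih2 i' hi'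
      · intro i hi
        rcases Nat.lt_or_ge i m with hi' | hi'
        · rw [pvGet2_set2_ne _ _ _ _ _ _ (Or.inl (by omega))]; exact ih3 i hi'
        · have hie : i = m := by omega
          subst hie
          rw [pvGet2_set2_self _ _ _ _ (by omega) (by rw [ih2 i (by omega)]; omega)]
          rfl

theorem base_TblInv (T : List Int) (tt : Int) :
    TblInv T tt 2 0
      ((List.range (T.length - 1)).foldl
        (fun F i => pvSet2 F i (i + 1) |T.getD i 0 + T.getD (i + 1) 0|)
        ((List.range T.length).map (fun _ => (List.range T.length).map (fun _ => (0 : Int))))) := by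
  obtain ⟨h1, h2, h3⟩ := base_fold T (T.length - 1) le_rfl
  exact ⟨h1, h2, fun i hi => h3 i (by omega), fun i j hj hij hb => by omega⟩

-- A's value for n ≥ 3
theorem asystent_ge3 (T : List Int) (h3 : 3 ≤ T.length) :
    asystent T = max |T.sum| (mp T 0 (T.length - 2)) := by
  have hT : T ≠ [] := by intro h; subst h; simp at h3
  have hout := outer_fold T
      (|((List.range' 1 (T.length - 1)).foldl (fun p i => p.set i (p.getD (i - 1) 0 + T.getD i 0))
          ((List.replicate T.length (0 : Int)).set 0 (T.getD 0 0))).getD (T.length - 1) 0|)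
      (T.length - 2) _ (base_TblInv T _)
  obtain ⟨h1, h2, hb, hm⟩ := hout
  have hval := hm 0 (T.length - 1) (by omega) (by omega) (Or.inl (by omega))
  show pvGet2 _ 0 (T.length - 1) = _
  rw [hval, pre_sum_eq T hT, show T.length - 1 - 0 - 1 = T.length - 2 from by omega]

-- B's value for n ≥ 2
theorem alt_min_fold (T : List Int) (c : Nat) :
    ((List.range c).map (fun k => pairAbs T (k + 1))).foldl min (pairAbs T 0) = mp T 0 c := by
  induction c with
  | zero => rfl
  | succ c ih =>
      rw [List.range_succ, List.map_append, List.foldl_append, ih, mp_snoc]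
      simp

theorem alt_ge2 (T : List Int) (h2 : 2 ≤ T.length) :
    asystent_alt T = max |T.sum| (mp T 0 (T.length - 2)) := by
  have h1 : ¬ T.length = 1 := by omega
  show (if T.length = 1 then (0 : Int) else _) = _
  rw [if_neg h1, show T.length - 1 = (T.length - 2) + 1 from by omega,
    List.range_succ_eq_map, List.map_cons, List.map_map]
  show max |T.sum| (((List.range (T.length - 2)).map
      ((fun i => |T.getD i 0 + T.getD (i + 1) 0|) ∘ Nat.succ)).foldl min
      |T.getD 0 0 + T.getD (0 + 1) 0|) = _
  exact congrArg _ (alt_min_fold T (T.length - 2))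

-- ===== VERDICT (by name: the statement is the Claim_ definition above) =====
theorem asystent_spec : Claim_equal_asystent := by
  intro T _ hT
  unfold Spec_asystent
  match T with
  | [a] => simp [asystent, asystent_alt, pvGet2]
  | [a, b] =>
      show asystent [a, b] = asystent_alt [a, b]
      simp [asystent, asystent_alt, pvGet2, pvSet2, pvInner, List.range_succ]
  | a :: b :: c :: r =>
      have h3 : 3 ≤ (a :: b :: c :: r).length := by simp
      rw [asystent_ge3 _ h3, alt_ge2 _ (by omega)]
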